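-- pv_equiv track=rewrite | github.com/nrdg42/aws-batch-cbmc | ci/snapshot/deployment_tools/account_orchestration/AccountOrchestrator.py | _parse_snapshot_id
-- ===== SOURCE A (Python) =====
-- def _parse_snapshot_id(output):
--     sid = None
--     for line in output.split('\n'):
--         if line.startswith('Updating SnapshotID to '):
--             sid = line[len('Updating SnapshotID to '):]
--             break
--     if sid is None:
--         raise UserWarning("snapshot id is none")
--     return sid
-- ===== SOURCE B (Python) =====
-- def _parse_snapshot_id(output):
--     PFX = 'Updating SnapshotID to '
--     if output.startswith(PFX):
--         start = len(PFX)
--     else: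
--         i = output.find('\n' + PFX)
--         if i < 0:
--             raise UserWarning("snapshot id is none")
--         start = i + 1 + len(PFX)
--     rest = output[start:]
--     j = rest.find('\n')
--     return rest if j < 0 else rest[:j]
-- ===== Notes on version B (the rewrite author's own statement) =====
-- stated objective: alternative
-- what changed: B replaces the per-line scan (split into lines plus a startswith loop) by substring search: a startswith check for a match on line 0, else str.find of the marker (newline followed by the prefix) locates the first line start carrying the prefix, and a second find of the next newline delimits the returned id; no line list or per-line loop exists in B.
import Mathlib
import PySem

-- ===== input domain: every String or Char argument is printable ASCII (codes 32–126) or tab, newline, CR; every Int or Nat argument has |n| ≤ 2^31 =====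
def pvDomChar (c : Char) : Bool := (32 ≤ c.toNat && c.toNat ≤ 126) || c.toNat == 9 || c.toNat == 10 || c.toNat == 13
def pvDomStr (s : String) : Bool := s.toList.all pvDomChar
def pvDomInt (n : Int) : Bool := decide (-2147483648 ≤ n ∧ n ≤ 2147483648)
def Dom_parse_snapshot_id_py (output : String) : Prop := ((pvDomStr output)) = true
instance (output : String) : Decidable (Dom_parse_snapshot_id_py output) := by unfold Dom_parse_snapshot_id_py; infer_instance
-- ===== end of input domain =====

-- B replaces the per-line scan (split('\n') + startswith loop) by two substring searches:
-- str.find of '\n'+prefix (or a startswith check for line 0) locates the first matching line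
-- start, and a second find('\n') delimits the id ("alternative" objective; same return value).
-- Both Pythons raise UserWarning when no line starts with the prefix; Pre_ excludes exactly those inputs.

def pvPfx : List Char := "Updating SnapshotID to ".toList

-- ===== PORT A =====
-- the for-loop over output.split('\n') with break: first matching line, sliced past the prefix
def pvLoopA : List (List Char) → Option (List Char)
  | [] => none
  | line :: rest =>
    if PySem.Chars.startswith line pvPfx then
      some (PySem.List.slice line (some (PySem.Chars.len pvPfx)) none)   -- line[len(prefix):]
    else pvLoopA rest

def parse_snapshot_id_py (output : String) : String :=
  match pvLoopA (PySem.Chars.splitOn output.toList ['\n']) with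
  | some sid => String.ofList sid
  | none => ""   -- Python: raise UserWarning("snapshot id is none"); excluded by Pre_

-- ===== PORT B =====
-- startswith check for a match on line 0, else output.find('\n' + PFX); then find('\n', …) via
-- rest = output[start:]; j = rest.find('\n'); return rest if j < 0 else rest[:j]
def parse_snapshot_id_py_alt (output : String) : String :=
  let s := output.toList
  let start? : Option Int :=
    if PySem.Chars.startswith s pvPfx then some (pvPfx.length : Int)
    else
      let i := PySem.Chars.find s ('\n' :: pvPfx)   -- output.find('\n' + PFX)
      if i < 0 then none else some (i + 1 + (pvPfx.length : Int))
  match start? with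
  | none => ""   -- Python: raise UserWarning("snapshot id is none"); excluded by Pre_
  | some st =>
    let rest := PySem.List.slice s (some st) none           -- output[start:]
    let j := PySem.Chars.find rest ['\n']                   -- rest.find('\n')
    String.ofList (if j < 0 then rest else PySem.List.slice rest none (some j))

-- ===== PRECONDITION & SPEC =====
-- Pre_ excludes exactly the inputs where A raises UserWarning: no line of the output starts with the prefix.
def Pre_parse_snapshot_id_py (output : String) : Prop :=
  ∃ l ∈ PySem.Chars.splitOn output.toList ['\n'],
    PySem.Chars.startswith l "Updating SnapshotID to ".toList = true
instance (output : String) : Decidable (Pre_parse_snapshot_id_py output) := by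
  unfold Pre_parse_snapshot_id_py; infer_instance

def pvWitness_parse_snapshot_id_py : String := "Updating SnapshotID to abc"

def Spec_parse_snapshot_id_py (output : String) (out : String) : Prop := out = parse_snapshot_id_py_alt output
instance (output : String) (out : String) : Decidable (Spec_parse_snapshot_id_py output out) := by
  unfold Spec_parse_snapshot_id_py; infer_instance

-- ===== CLAIM (what is proved, stated in full; the proofs are below) =====
def Claim_equal_parse_snapshot_id_py : Prop := ∀ (output : String), Dom_parse_snapshot_id_py output → Pre_parse_snapshot_id_py output → Spec_parse_snapshot_id_py output (parse_snapshot_id_py output)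

-- ===== LEMMAS AND PROOFS =====

-- proof-side model of split('\n'): one char at a time, accumulating the current line
def mySplit (pre : List Char) : List Char → List (List Char)
  | [] => [pre]
  | c :: rest => if c = '\n' then pre :: mySplit [] rest else mySplit (pre ++ [c]) rest

theorem splitOn_go_eq (fuel : Nat) : ∀ (l cur : List Char) (acc : List (List Char)),
    l.length ≤ fuel →
    PySem.Chars.splitOn.go ['\n'] fuel l cur acc = acc.reverse ++ mySplit cur.reverse l := by
  induction fuel with
  | zero =>
    intro l cur acc h
    have : l = [] := List.length_eq_zero_iff.mp (by omega)
    subst this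
    simp [PySem.Chars.splitOn.go, mySplit]
  | succ f ih =>
    intro l cur acc h
    cases l with
    | nil => simp [PySem.Chars.splitOn.go, mySplit]
    | cons c rest =>
      simp only [PySem.Chars.splitOn.go]
      by_cases hc : c = '\n'
      · subst hc
        simp only [List.isPrefixOf, BEq.rfl, Bool.true_and, if_pos]
        rw [show List.drop (['\n'].length) ('\n' :: rest) = rest from rfl]
        rw [ih rest [] _ (by simp at h ⊢; omega)]
        simp [mySplit]
      · have : (['\n'].isPrefixOf (c :: rest)) = false := by
          simp [List.isPrefixOf]; exact fun hh => absurd hh.symm hc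
        rw [if_neg (by simp [this])]
        rw [ih rest (c :: cur) acc (by simp at h ⊢; omega)]
        simp [mySplit, hc]

theorem splitOn_eq_mySplit (s : List Char) :
    PySem.Chars.splitOn s ['\n'] = mySplit [] s := by
  unfold PySem.Chars.splitOn
  rw [splitOn_go_eq (s.length + 1) s [] [] (by omega)]
  simp

theorem singleton_prefix_iff (c : Char) (t : List Char) : [c] <+: t ↔ t.head? = some c := by
  cases t with
  | nil => simp
  | cons a t => simp [List.cons_prefix_cons]; exact eq_comm

theorem idxOf_le_of_getElem? {α : Type} [BEq α] [LawfulBEq α] (c : α) :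
    ∀ (s : List α) (i : Nat), s[i]? = some c → List.idxOf c s ≤ i := by
  intro s
  induction s with
  | nil => intro i h; simp at h
  | cons a t ih =>
    intro i h
    cases i with
    | zero => simp at h; simp [h]
    | succ j =>
      simp at h
      rw [List.idxOf_cons]
      cases hb : a == c with
      | true => simp
      | false => simpa using Nat.succ_le_succ (ih j h)

theorem find_newline_eq (s : List Char) (h : '\n' ∈ s) :
    PySem.Chars.find s ['\n'] = (List.idxOf '\n' s : Int) := by
  have hinf : ['\n'] <:+: s := by
    obtain ⟨l1, l2, rfl⟩ := List.append_of_mem h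
    exact ⟨l1, l2, by simp⟩
  have h0 : 0 ≤ PySem.Chars.find s ['\n'] := (PySem.Chars.find_nonneg_iff s ['\n']).mpr hinf
  obtain ⟨hp, hmin⟩ := PySem.Chars.find_spec h0
  set k := (PySem.Chars.find s ['\n']).toNat with hk
  have hgk : s[k]? = some '\n' := by
    rw [← List.head?_drop]; exact (singleton_prefix_iff _ _).mp hp
  have hle : List.idxOf '\n' s ≤ k := idxOf_le_of_getElem? '\n' s k hgk
  have hlt : List.idxOf '\n' s < s.length := List.idxOf_lt_length_iff.mpr h
  have hge : k ≤ List.idxOf '\n' s := by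
    by_contra hc
    apply hmin (List.idxOf '\n' s) (by omega)
    rw [singleton_prefix_iff, List.head?_drop]
    simp [List.getElem?_eq_some_iff]
    omega
  have : List.idxOf '\n' s = k := by omega
  omega

theorem mySplit_decomp (s : List Char) : ∀ (pre : List Char), mySplit pre s =
    if '\n' ∈ s then
      (pre ++ s.take (List.idxOf '\n' s)) :: mySplit [] (s.drop (List.idxOf '\n' s + 1))
    else [pre ++ s] := by
  induction s with
  | nil => intro pre; simp [mySplit]
  | cons c rest ih =>
    intro pre
    by_cases hc : c = '\n'
    · subst hc
      simp [mySplit]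
    · rw [show mySplit pre (c :: rest) = mySplit (pre ++ [c]) rest by simp [mySplit, hc]]
      rw [ih (pre ++ [c])]
      have hidx : List.idxOf '\n' (c :: rest) = List.idxOf '\n' rest + 1 := by
        rw [List.idxOf_cons]
        simp [show (c == '\n') = false by simpa using hc]
      by_cases hm : '\n' ∈ rest
      · have hm' : '\n' ∈ c :: rest := List.mem_cons_of_mem _ hm
        simp only [if_pos hm, if_pos hm', hidx]
        simp [List.take_succ_cons, List.drop_succ_cons]
      · have hm' : '\n' ∉ c :: rest := by
          simp [hm]; exact fun hh => hc hh.symm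
        rw [if_neg hm, if_neg hm']
        simp

-- characterise find by first-occurrence evidence
theorem find_eq_of (t pat : List Char) (m : Nat) (h1 : pat <+: t.drop m)
    (h2 : ∀ i, i < m → ¬ pat <+: t.drop i) : PySem.Chars.find t pat = (m : Int) := by
  have hinf : pat <:+: t := by
    obtain ⟨u, hu⟩ := h1
    exact ⟨t.take m, u, by rw [List.append_assoc, hu]; simp⟩
  have h0 : 0 ≤ PySem.Chars.find t pat := (PySem.Chars.find_nonneg_iff t pat).mpr hinf
  obtain ⟨hp, hmin⟩ := PySem.Chars.find_spec h0
  have hlo : m ≤ (PySem.Chars.find t pat).toNat := by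
    by_contra hc
    exact h2 _ (by omega) hp
  have hhi : (PySem.Chars.find t pat).toNat ≤ m := by
    by_contra hc
    exact hmin m (by omega) h1
  omega

theorem find_eq_neg_one_of (t pat : List Char) (h : ∀ i, ¬ pat <+: t.drop i) :
    PySem.Chars.find t pat = -1 := by
  rw [PySem.Chars.find_eq_neg_one_iff]
  intro hinf
  obtain ⟨l1, l2, hl⟩ := hinf
  exact h l1.length (by rw [← hl]; simp)

-- '\n' ∉ the prefix constant
theorem nl_not_mem_pfx : '\n' ∉ pvPfx := by decide

theorem pfx_len : pvPfx.length = 23 := by decide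

-- the suffix of the first matching line: everything up to the next newline
def untilNL (t : List Char) : List Char :=
  if PySem.Chars.find t ['\n'] < 0 then t else t.take (PySem.Chars.find t ['\n']).toNat

-- B's search result, expressed on the character list
def goalB (s : List Char) : Option (List Char) :=
  if PySem.Chars.startswith s pvPfx then some (untilNL (s.drop 23))
  else if PySem.Chars.find s ('\n' :: pvPfx) < 0 then none
  else some (untilNL (s.drop ((PySem.Chars.find s ('\n' :: pvPfx)).toNat + 24)))

theorem nl_mem_of_drop {s pat : List Char} {i : Nat} (hc : '\n' ∈ pat)
    (h : pat <+: s.drop i) : '\n' ∈ s := by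
  obtain ⟨u, hu⟩ := h
  have : '\n' ∈ s.drop i := by rw [← hu]; exact List.mem_append_left _ hc
  exact List.mem_of_mem_drop this

theorem main (s : List Char) : pvLoopA (mySplit [] s) = goalB s := by
  by_cases hm : '\n' ∈ s
  · -- a newline exists: first line is s.take k, k = first newline index
    set k := List.idxOf '\n' s with hkdef
    have hlt : k < s.length := List.idxOf_lt_length_iff.mpr hm
    have hfk : PySem.Chars.find s ['\n'] = (k : Int) := find_newline_eq s hm
    have h0 : 0 ≤ PySem.Chars.find s ['\n'] := by rw [hfk]; omega
    obtain ⟨hp1, hmin⟩ := PySem.Chars.find_spec h0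
    rw [hfk] at hp1 hmin
    simp only [Int.toNat_natCast] at hp1 hmin
    have hdropk : s.drop k = '\n' :: s.drop (k + 1) := by
      obtain ⟨u, hu⟩ := hp1
      rw [← hu]
      have : s.drop (k + 1) = (s.drop k).drop 1 := by rw [List.drop_drop]
      rw [this, ← hu]
      simp
    have occ_ge_k : ∀ i, ('\n' :: pvPfx) <+: s.drop i → k ≤ i := by
      intro i hi
      by_contra hc
      exact hmin i (by omega) ⟨pvPfx ++ hi.choose, by rw [← List.append_assoc]; exact hi.choose_spec⟩
    have occ_k_iff : ('\n' :: pvPfx) <+: s.drop k ↔ pvPfx <+: s.drop (k + 1) := by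
      rw [hdropk, List.cons_prefix_cons]
      simp
    rw [mySplit_decomp, if_pos hm, List.nil_append, ← hkdef]
    by_cases hs : PySem.Chars.startswith s pvPfx
    · -- line 0 matches
      have hps : pvPfx <+: s := (PySem.Chars.startswith_iff s pvPfx).mp hs
      have htake : s.take 23 = pvPfx := by
        have := List.prefix_iff_eq_take.mp hps
        rw [pfx_len] at this
        exact this.symm
      have hk23 : 23 ≤ k := by
        by_contra hc
        apply nl_not_mem_pfx
        rw [← htake]
        have hgk : s[k] = '\n' := by
          have := hdropk
          rw [List.drop_eq_getElem_cons hlt] at this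
          exact (List.cons.injEq _ _ _ _ ▸ this).1
        have : (s.take 23)[k]'(by simp; omega) = '\n' := by
          rw [List.getElem_take]; exact hgk
        rw [← this]
        exact List.getElem_mem _
      have hstake : PySem.Chars.startswith (s.take k) pvPfx := by
        rw [PySem.Chars.startswith_iff, ← htake]
        rw [show s.take 23 = (s.take k).take 23 by rw [List.take_take]; congr 1; omega]
        exact List.take_prefix _ _
      simp only [pvLoopA, hstake, if_true, goalB, hs, if_true]
      have hslice : PySem.List.slice (s.take k) (some (PySem.Chars.len pvPfx)) none
          = (s.drop 23).take (k - 23) := by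
        have : PySem.Chars.len pvPfx = ((23 : Nat) : Int) := by decide
        rw [this, PySem.List.slice_from_natCast, List.drop_take]
      have hfind : PySem.Chars.find (s.drop 23) ['\n'] = ((k - 23 : Nat) : Int) := by
        apply find_eq_of
        · rw [List.drop_drop, show 23 + (k - 23) = k by omega, hdropk]
          exact ⟨s.drop (k + 1), rfl⟩
        · intro i hi
          rw [List.drop_drop]
          exact hmin (23 + i) (by omega)
      rw [hslice]
      simp only [untilNL, hfind]
      rw [if_neg (by omega)]
      simp
    · -- line 0 does not match: recurse / search past the newline
      have hstake : ¬ PySem.Chars.startswith (s.take k) pvPfx := by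
        intro hc
        exact hs ((PySem.Chars.startswith_iff s pvPfx).mpr
          (((PySem.Chars.startswith_iff _ pvPfx).mp hc).trans (List.take_prefix _ _)))
      have hrec := main (s.drop (k + 1))
      simp only [pvLoopA, hstake, if_false, Bool.false_eq_true]
      rw [hrec]
      by_cases hrs : PySem.Chars.startswith (s.drop (k + 1)) pvPfx
      · -- match starts right after the first newline: find s pat = k
        have hocc : ('\n' :: pvPfx) <+: s.drop k :=
          occ_k_iff.mpr ((PySem.Chars.startswith_iff _ pvPfx).mp hrs)
        have hfind : PySem.Chars.find s ('\n' :: pvPfx) = (k : Int) := by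
          apply find_eq_of _ _ k hocc
          intro i hi hc
          exact absurd (occ_ge_k i hc) (by omega)
        simp only [goalB, hs, if_false, Bool.false_eq_true, hrs, if_true, hfind]
        rw [if_neg (by omega), Int.toNat_natCast, List.drop_drop]
      · -- no match on line 1 either: shift the search
        have hnk : ¬ ('\n' :: pvPfx) <+: s.drop k := by
          intro hc
          exact hrs ((PySem.Chars.startswith_iff _ pvPfx).mpr (occ_k_iff.mp hc))
        by_cases hfr : PySem.Chars.find (s.drop (k + 1)) ('\n' :: pvPfx) < 0
        · have hfr1 : PySem.Chars.find (s.drop (k + 1)) ('\n' :: pvPfx) = -1 := by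
            have := PySem.Chars.neg_one_le_find (s.drop (k + 1)) ('\n' :: pvPfx)
            omega
          have hnoinf : ¬ ('\n' :: pvPfx) <:+: s.drop (k + 1) :=
            (PySem.Chars.find_eq_neg_one_iff _ _).mp hfr1
          have hnone : ∀ j, ¬ ('\n' :: pvPfx) <+: (s.drop (k + 1)).drop j := by
            intro j hj
            exact hnoinf (by
              have : PySem.Chars.isIn ('\n' :: pvPfx) (s.drop (k + 1)) = true :=
                (PySem.Chars.exists_prefix_drop_iff_isIn _ _).mp ⟨j, hj⟩
              exact (PySem.Chars.isIn_iff_infix _ _).mp this)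
          have hfs : PySem.Chars.find s ('\n' :: pvPfx) = -1 := by
            apply find_eq_neg_one_of
            intro i hi
            have hik := occ_ge_k i hi
            rcases Nat.eq_or_lt_of_le hik with h | h
            · exact hnk (h ▸ hi)
            · apply hnone (i - (k + 1))
              rw [List.drop_drop, show k + 1 + (i - (k + 1)) = i by omega]
              exact hi
          simp only [goalB, hs, if_false, Bool.false_eq_true, hrs, hfs, hfr1]
          norm_num
        · have h0 : 0 ≤ PySem.Chars.find (s.drop (k + 1)) ('\n' :: pvPfx) := by omega
          set m := (PySem.Chars.find (s.drop (k + 1)) ('\n' :: pvPfx)).toNat with hmdef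
          obtain ⟨hpm, hminr⟩ := PySem.Chars.find_spec h0
          rw [← hmdef] at hpm hminr
          have hfs : PySem.Chars.find s ('\n' :: pvPfx) = ((k + 1 + m : Nat) : Int) := by
            apply find_eq_of
            · rw [← List.drop_drop]
              exact hpm
            · intro i hi hc
              have hik := occ_ge_k i hc
              rcases Nat.eq_or_lt_of_le hik with h | h
              · exact hnk (h ▸ hc)
              · apply hminr (i - (k + 1)) (by omega)
                rw [List.drop_drop, show k + 1 + (i - (k + 1)) = i by omega]
                exact hc
          have hfr' : PySem.Chars.find (s.drop (k + 1)) ('\n' :: pvPfx) = ((m : Nat) : Int) := by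
            rw [hmdef]; omega
          simp only [goalB, hs, if_false, Bool.false_eq_true, hrs, hfs, hfr']
          rw [if_neg (by omega), if_neg (by omega)]
          rw [Int.toNat_natCast, Int.toNat_natCast, List.drop_drop]
          congr 2
  · -- no newline: the whole string is the single line
    rw [mySplit_decomp, if_neg hm]
    simp only [List.nil_append]
    unfold goalB
    by_cases hs : PySem.Chars.startswith s pvPfx
    · simp only [pvLoopA, hs, if_true]
      have hfn : PySem.Chars.find (s.drop 23) ['\n'] = -1 := by
        apply find_eq_neg_one_of
        intro i hp
        rw [List.drop_drop] at hp
        exact hm (nl_mem_of_drop (by simp) hp)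
      have hlen : PySem.Chars.len pvPfx = ((23 : Nat) : Int) := by decide
      rw [hlen, PySem.List.slice_from_natCast]
      simp only [untilNL, hfn]
      rw [if_pos (by omega)]
    · have hfs : PySem.Chars.find s ('\n' :: pvPfx) = -1 := by
        apply find_eq_neg_one_of
        intro i hp
        exact hm (nl_mem_of_drop (by simp) hp)
      simp only [pvLoopA, hs, if_false, Bool.false_eq_true, hfs]
      norm_num
termination_by s.length
decreasing_by
  simp only [List.length_drop]
  omega

theorem altB_eq (output : String) :
    parse_snapshot_id_py_alt output =
      match goalB output.toList with
      | some sid => String.ofList sid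
      | none => "" := by
  unfold parse_snapshot_id_py_alt goalB untilNL
  by_cases hs : PySem.Chars.startswith output.toList pvPfx
  · simp only [hs, if_true]
    have h1 : PySem.List.slice output.toList (some ((pvPfx.length : Nat) : Int)) none
        = output.toList.drop 23 := by
      rw [PySem.List.slice_from_natCast, pfx_len]
    rw [h1]
    by_cases hj : PySem.Chars.find (output.toList.drop 23) ['\n'] < 0
    · simp [hj]
    · have hj' : PySem.Chars.find (output.toList.drop 23) ['\n']
          = (((PySem.Chars.find (output.toList.drop 23) ['\n']).toNat : Nat) : Int) := by omega
      rw [if_neg hj, if_neg hj, hj', PySem.List.slice_to_natCast]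
      simp only [Int.toNat_natCast]
  · simp only [hs, if_false, Bool.false_eq_true]
    by_cases hi : PySem.Chars.find output.toList ('\n' :: pvPfx) < 0
    · simp [hi]
    · rw [if_neg hi, if_neg hi]
      have hst : PySem.Chars.find output.toList ('\n' :: pvPfx) + 1 + ((pvPfx.length : Nat) : Int)
          = (((PySem.Chars.find output.toList ('\n' :: pvPfx)).toNat + 24 : Nat) : Int) := by
        rw [pfx_len]; omega
      simp only [hst]
      rw [PySem.List.slice_from_natCast]
      by_cases hj : PySem.Chars.find (output.toList.drop ((PySem.Chars.find output.toList ('\n' :: pvPfx)).toNat + 24)) ['\n'] < 0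
      · simp [hj]
      · rw [if_neg hj, if_neg hj]
        have hj' : PySem.Chars.find (output.toList.drop ((PySem.Chars.find output.toList ('\n' :: pvPfx)).toNat + 24)) ['\n']
            = (((PySem.Chars.find (output.toList.drop ((PySem.Chars.find output.toList ('\n' :: pvPfx)).toNat + 24)) ['\n']).toNat : Nat) : Int) := by omega
        rw [hj', PySem.List.slice_to_natCast]
        simp only [Int.toNat_natCast]

-- ===== VERDICT (by name: the statement is the Claim_ definition above) =====
theorem parse_snapshot_id_py_spec : Claim_equal_parse_snapshot_id_py := by
  intro output _ _
  unfold Spec_parse_snapshot_id_py parse_snapshot_id_py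
  rw [altB_eq, show ('\n' :: ([] : List Char)) = ['\n'] from rfl, splitOn_eq_mySplit, main]
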